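-- pv_equiv track=rewrite | github.com/Annikamalze/ImplementingSearch | src/naive_search_6.py | number_of_queries
-- ===== SOURCE A (Python) =====
-- def number_of_queries(queries_orig, number_wanted):
--     if len(queries_orig) >= number_wanted:
--         queries = queries_orig[:number_wanted] # auf gewünschte Anzahl kürzen
--         return queries
--     else:
--         # Duplizieren bis gewünschte Anzahl
--         extended = queries_orig.copy()
--         while len(extended) < number_wanted:
--             needed = number_wanted - len(extended)
--             extended += queries_orig[:needed]
--         return extended
-- ===== SOURCE B (Python) =====
-- def number_of_queries(queries_orig, number_wanted):
--     if len(queries_orig) >= number_wanted: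
--         return queries_orig[:number_wanted]
--     # closed-form tiling: ceil-divide, multiply, slice
--     reps = -(-number_wanted // len(queries_orig))
--     return (queries_orig * reps)[:number_wanted]
-- ===== Notes on version B (the rewrite author's own statement) =====
-- stated objective: simpler
-- what changed: replaces the while-loop that appends slices until the list is long enough by a closed form: ceiling-division repeat count, list multiplication and one slice
import Mathlib
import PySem

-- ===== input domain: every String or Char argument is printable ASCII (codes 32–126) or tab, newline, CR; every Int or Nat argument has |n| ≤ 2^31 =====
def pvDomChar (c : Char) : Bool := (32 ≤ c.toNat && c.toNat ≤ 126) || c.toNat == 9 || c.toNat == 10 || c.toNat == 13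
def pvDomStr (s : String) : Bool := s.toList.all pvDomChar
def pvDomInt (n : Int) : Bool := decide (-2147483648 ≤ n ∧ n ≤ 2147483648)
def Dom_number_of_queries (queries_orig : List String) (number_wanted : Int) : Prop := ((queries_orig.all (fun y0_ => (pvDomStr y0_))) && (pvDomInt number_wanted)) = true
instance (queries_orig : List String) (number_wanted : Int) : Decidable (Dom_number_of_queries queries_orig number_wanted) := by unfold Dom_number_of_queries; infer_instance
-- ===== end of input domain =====

-- B replaces A's while-loop tiling by a closed form (ceiling-division repeat count,
-- list multiplication, one slice); objective: simpler.

-- ===== PORT A =====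
-- A's while-loop; the `queries_orig ≠ []` conjunct is a totality guard only: with
-- queries_orig = [] and length < number_wanted the Python loop never terminates
-- (such inputs are outside Pre_).
def tileLoop (queries_orig : List String) (number_wanted : Int) (extended : List String) : List String :=
  if h : (extended.length : Int) < number_wanted ∧ queries_orig ≠ [] then
    tileLoop queries_orig number_wanted
      (extended ++ PySem.List.slice queries_orig none (some (number_wanted - extended.length)))
  else
    extended
termination_by (number_wanted - extended.length).toNat
decreasing_by
  have hq : 1 ≤ queries_orig.length := List.length_pos_iff.mpr h.2
  have h0 : (0:Int) ≤ number_wanted - extended.length := le_of_lt (by omega)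
  rw [PySem.List.slice_to]
  · simp only [List.length_append, List.length_take]
    omega
  · exact h0

def number_of_queries (queries_orig : List String) (number_wanted : Int) : List String :=
  if (queries_orig.length : Int) ≥ number_wanted then
    PySem.List.slice queries_orig none (some number_wanted)
  else
    tileLoop queries_orig number_wanted queries_orig

-- ===== PORT B =====
def number_of_queries_alt (queries_orig : List String) (number_wanted : Int) : List String :=
  if (queries_orig.length : Int) ≥ number_wanted then
    PySem.List.slice queries_orig none (some number_wanted)
  else
    -- reps = -(-number_wanted // len(queries_orig))  (ceiling division)
    let reps : Int := -(PySem.Int.floordiv (-number_wanted) queries_orig.length)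
    -- (queries_orig * reps)[:number_wanted]
    PySem.List.slice ((List.replicate reps.toNat queries_orig).flatten) none (some number_wanted)

-- ===== PRECONDITION & SPEC =====
-- Pre_ excludes queries_orig = [] with number_wanted > 0: there A's while-loop never
-- terminates (and B raises ZeroDivisionError), so neither program returns.
def Pre_number_of_queries (queries_orig : List String) (number_wanted : Int) : Prop :=
  queries_orig ≠ [] ∨ number_wanted ≤ 0
instance (queries_orig : List String) (number_wanted : Int) : Decidable (Pre_number_of_queries queries_orig number_wanted) := by unfold Pre_number_of_queries; infer_instance

def pvWitness_number_of_queries : List String × Int := (["a", "b"], 5)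

def Spec_number_of_queries (queries_orig : List String) (number_wanted : Int) (out : List String) : Prop := out = number_of_queries_alt queries_orig number_wanted
instance (queries_orig : List String) (number_wanted : Int) (out : List String) : Decidable (Spec_number_of_queries queries_orig number_wanted out) := by unfold Spec_number_of_queries; infer_instance

-- ===== CLAIM (what is proved, stated in full; the proofs are below) =====
def Claim_equal_number_of_queries : Prop := ∀ (queries_orig : List String) (number_wanted : Int), Dom_number_of_queries queries_orig number_wanted → Pre_number_of_queries queries_orig number_wanted → Spec_number_of_queries queries_orig number_wanted (number_of_queries queries_orig number_wanted)

-- ===== LEMMAS AND PROOFS =====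

theorem length_flatten_replicate (qs : List String) (K : Nat) :
    ((List.replicate K qs).flatten).length = K * qs.length := by
  induction K with
  | zero => simp
  | succ k ih => simp [List.replicate_succ, ih, Nat.succ_mul]; ring

theorem takeFlat_succ (qs : List String) (d K : Nat) (h : d ≤ K * qs.length) :
    ((List.replicate K qs).flatten).take d = ((List.replicate (K+1) qs).flatten).take d := by
  rw [List.replicate_succ', List.flatten_append,
    List.take_append_of_le_length (by rw [length_flatten_replicate]; exact h)]

theorem takeFlat_mono (qs : List String) (d K : Nat) (h : d ≤ K * qs.length) :
    ∀ j : Nat, ((List.replicate K qs).flatten).take d = ((List.replicate (K+j) qs).flatten).take d := by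
  intro j
  induction j with
  | zero => rfl
  | succ i ih =>
      rw [ih, show K + (i+1) = (K+i) + 1 by omega]
      exact takeFlat_succ qs d (K+i) (Nat.le_trans h (Nat.mul_le_mul_right _ (by omega)))

theorem takeFlat_eq (qs : List String) (d K₁ K₂ : Nat)
    (h1 : d ≤ K₁ * qs.length) (h2 : d ≤ K₂ * qs.length) :
    ((List.replicate K₁ qs).flatten).take d = ((List.replicate K₂ qs).flatten).take d := by
  rw [takeFlat_mono qs d K₁ h1 K₂, takeFlat_mono qs d K₂ h2 K₁, Nat.add_comm]

theorem take_flat_succ_split (qs : List String) (d k : Nat) (hd : qs.length ≤ d) :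
    ((List.replicate (k+1) qs).flatten).take d
      = qs ++ ((List.replicate k qs).flatten).take (d - qs.length) := by
  rw [List.replicate_succ, List.flatten_cons, List.take_append,
    List.take_of_length_le hd]

theorem take_flat_pos (qs : List String) (d K : Nat) (hK : 1 ≤ K) (hd : d ≤ qs.length) :
    ((List.replicate K qs).flatten).take d = qs.take d := by
  cases K with
  | zero => omega
  | succ k =>
    rw [List.replicate_succ, List.flatten_cons, List.take_append,
      Nat.sub_eq_zero_of_le hd, List.take_zero, List.append_nil]

theorem loop_eq (qs : List String) (hq : qs ≠ []) (n : Int) (K : Nat) :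
    ∀ d : Nat, ∀ ext : List String, (ext.length : Int) < n →
      (n - ext.length).toNat = d → n - ext.length ≤ ((K * qs.length : Nat) : Int) →
      tileLoop qs n ext = ext ++ ((List.replicate K qs).flatten).take (n - (ext.length : Int)).toNat := by
  intro d
  induction d using Nat.strong_induction_on with
  | _ d ih =>
    intro ext hlt hd hK
    have hL : 1 ≤ qs.length := List.length_pos_iff.mpr hq
    have h0 : (0:Int) ≤ n - ext.length := le_of_lt (by omega)
    have hsl : PySem.List.slice qs none (some (n - (ext.length : Int)))
        = qs.take (n - (ext.length : Int)).toNat := by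
      rw [PySem.List.slice_to]
      exact h0
    rw [tileLoop, dif_pos ⟨hlt, hq⟩, hsl]
    set dd := (n - (ext.length : Int)).toNat with hdd
    have hdd1 : 1 ≤ dd := by omega
    have hKL : dd ≤ K * qs.length := by omega
    have hK1 : 1 ≤ K := by
      rcases Nat.eq_zero_or_pos K with h | h
      · subst h; simp at hKL; omega
      · exact h
    by_cases hcase : dd ≤ qs.length
    · -- final partial append: loop exits next iteration
      have hlen : (ext ++ qs.take dd).length = ext.length + dd := by
        simp [List.length_take]; omega
      rw [tileLoop, dif_neg (by rw [hlen]; push_neg; intro hc; exfalso; omega)]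
      rw [take_flat_pos qs dd K hK1 hcase]
    · -- full append: recurse
      push_neg at hcase
      have htake : qs.take dd = qs := List.take_of_length_le (by omega)
      rw [htake]
      have hlen : (ext ++ qs).length = ext.length + qs.length := by simp
      have hlt' : ((ext ++ qs).length : Int) < n := by rw [hlen]; push_cast; omega
      have hrec := ih (dd - qs.length) (by omega) (ext ++ qs) hlt'
        (by rw [hlen]; push_cast; omega)
        (by rw [hlen]; push_cast at hK ⊢; omega)
      rw [hrec, List.append_assoc]
      congr 1
      have hd2 : (n - ((ext ++ qs).length : Int)).toNat = dd - qs.length := by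
        rw [hlen]; push_cast; omega
      rw [hd2]
      obtain ⟨k, hk⟩ : ∃ k, K = k + 1 := ⟨K - 1, by omega⟩
      rw [hk, take_flat_succ_split qs dd k (le_of_lt hcase)]
      congr 1
      have e : K * qs.length = k * qs.length + qs.length := by rw [hk]; ring
      exact takeFlat_eq qs (dd - qs.length) (k+1) k
        (by rw [← hk, e]; omega) (by omega)

theorem number_of_queries_spec : Claim_equal_number_of_queries := by
  intro qs n _ hpre
  unfold Spec_number_of_queries number_of_queries number_of_queries_alt
  by_cases hge : (qs.length : Int) ≥ n
  · rw [if_pos hge, if_pos hge]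
  · rw [if_neg hge, if_neg hge]
    push_neg at hge
    have hq : qs ≠ [] := by
      intro hnil
      rcases hpre with h | h
      · exact h hnil
      · subst hnil; simp at hge; omega
    have hL : 1 ≤ qs.length := List.length_pos_iff.mpr hq
    have hLpos : (0:Int) < qs.length := by exact_mod_cast hL
    set reps : Int := -(PySem.Int.floordiv (-n) qs.length) with hreps
    have hceil : (reps - 1) * qs.length < n ∧ n ≤ reps * qs.length :=
      (PySem.Int.neg_floordiv_neg_eq_iff_of_pos hLpos).mp hreps.symm
    have hrpos : 1 ≤ reps := by nlinarith [hceil.1, hceil.2]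
    have hn0 : (0:Int) ≤ n := by omega
    have hrn : (reps.toNat : Int) = reps := Int.toNat_of_nonneg (by omega)
    have hRL : n ≤ (reps.toNat * qs.length : Nat) := by push_cast [hrn]; exact hceil.2
    have hsl : PySem.List.slice ((List.replicate reps.toNat qs).flatten) none (some n)
        = ((List.replicate reps.toNat qs).flatten).take n.toNat := by
      rw [PySem.List.slice_to]
      exact hn0
    rw [hsl]
    rw [loop_eq qs hq n reps.toNat (n - qs.length).toNat qs hge rfl (by omega)]
    set R := reps.toNat with hR
    have hR1 : 1 ≤ R := by omega
    have hnL : qs.length ≤ n.toNat := by omega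
    obtain ⟨k, hk⟩ : ∃ k, R = k + 1 := ⟨R - 1, by omega⟩
    rw [hk, take_flat_succ_split qs n.toNat k hnL]
    congr 1
    rw [show n.toNat - qs.length = (n - (qs.length : Int)).toNat by omega]
    have e : R * qs.length = k * qs.length + qs.length := by rw [hk]; ring
    exact takeFlat_eq qs (n - (qs.length : Int)).toNat (k+1) k
      (by rw [← hk]; omega) (by rw [← hk] at *; omega)
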